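-- pv_equiv track=rewrite | github.com/RaviTeja163/Heavy-N-queens-Heuristic-Optimization | 9Quuen_HillClimbing_2A.py | get_Q_Positions
-- ===== SOURCE A (Python) =====
-- def get_Q_Positions(board):
--     pos = []
--     for i in range(len(board)):
--         for j in range(len(board)):
--             if board[j][i] > 0:
--                 pos.append(j)
--                 break
--     return pos
-- ===== SOURCE B (Python) =====
-- def get_Q_Positions(board):
--     n = len(board)
--     first_hit = {}
--     for j, row in enumerate(board):
--         for i, v in enumerate(row):
--             if v > 0 and i not in first_hit:
--                 first_hit[i] = j
--     return [first_hit[i] for i in range(n) if i in first_hit]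
-- ===== Notes on version B (the rewrite author's own statement) =====
-- stated objective: alternative
-- what changed: Replaces the column-major scan-with-break by a row-major single pass that records the first hitting row per column in a dict, then emits the recorded rows in column order.
-- outside the precondition, e.g. on get_Q_Positions([[-1, 5], [3]]): A returns [1, 0], B returns [1, 0]; on get_Q_Positions([[0], [1]]): A raises IndexError, B returns [1]
import Mathlib
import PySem

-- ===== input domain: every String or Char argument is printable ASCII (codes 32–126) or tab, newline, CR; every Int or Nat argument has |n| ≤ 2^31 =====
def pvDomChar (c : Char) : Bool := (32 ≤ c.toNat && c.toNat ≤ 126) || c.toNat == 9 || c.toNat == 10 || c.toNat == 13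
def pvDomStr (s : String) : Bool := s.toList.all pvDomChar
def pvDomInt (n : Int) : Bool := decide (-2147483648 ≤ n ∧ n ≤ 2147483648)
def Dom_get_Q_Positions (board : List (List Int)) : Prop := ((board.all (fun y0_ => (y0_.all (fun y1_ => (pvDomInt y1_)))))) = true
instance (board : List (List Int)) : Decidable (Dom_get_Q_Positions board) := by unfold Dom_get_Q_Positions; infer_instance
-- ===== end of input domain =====

-- B replaces A's column-major scan-with-break by a row-major pass recording the first
-- hitting row per column in a dict, then emits the recorded rows in column order (alternative).

-- ===== PORT A =====
-- inner 'for j in range(len(board)): if board[j][i] > 0: append j; break'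
def aFind (board : List (List Int)) (i : Nat) : List Nat → Option Nat
  | [] => none
  | j :: js => if (board.getD j []).getD i 0 > 0 then some j else aFind board i js

def get_Q_Positions (board : List (List Int)) : List Int :=
  (List.range board.length).foldl
    (fun pos i =>
      match aFind board i (List.range board.length) with
      | some j => pos ++ [(j : Int)]
      | none => pos) []

-- ===== PORT B =====
-- 'for j, row in enumerate(board): for i, v in enumerate(row): if v > 0 and i not in first_hit: first_hit[i] = j'
def bTable (board : List (List Int)) : PySem.Dict Int Int :=
  (PySem.List.enumerate board).foldl
    (fun t p =>
      (PySem.List.enumerate p.2).foldl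
        (fun t q => if q.2 > 0 ∧ t.contains q.1 = false then t.insert q.1 p.1 else t) t)
    PySem.Dict.empty

def get_Q_Positions_alt (board : List (List Int)) : List Int :=
  (PySem.List.pyRange 0 board.length 1).filterMap (fun i => (bTable board).get? i)

-- ===== PRECONDITION & SPEC =====
-- Pre_ requires every row to be at least len(board) long (A's square-board assumption);
-- on shorter rows A's board[j][i] can raise IndexError, though on some ragged boards A
-- happens to return before reaching a short row — both programs then still agree.
def Pre_get_Q_Positions (board : List (List Int)) : Prop :=
  ∀ row ∈ board, board.length ≤ row.length
instance (board : List (List Int)) : Decidable (Pre_get_Q_Positions board) := by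
  unfold Pre_get_Q_Positions; infer_instance

def pvWitness_get_Q_Positions : List (List Int) := [[1, 0], [0, 1]]

def Spec_get_Q_Positions (board : List (List Int)) (out : List Int) : Prop := out = get_Q_Positions_alt board
instance (board : List (List Int)) (out : List Int) : Decidable (Spec_get_Q_Positions board out) := by unfold Spec_get_Q_Positions; infer_instance

-- ===== CLAIM (what is proved, stated in full; the proofs are below) =====
def Claim_equal_get_Q_Positions : Prop := ∀ (board : List (List Int)), Dom_get_Q_Positions board → Pre_get_Q_Positions board → Spec_get_Q_Positions board (get_Q_Positions board)

-- ===== LEMMAS AND PROOFS =====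

-- index (as an Int, counting from s) of the first row of `rows` hitting column i
def firstRow (i : Int) : List (List Int) → Int → Option Int
  | [], _ => none
  | r :: rs, s =>
      if 0 ≤ i ∧ i < (r.length : Int) ∧ 0 < r.getD i.toNat 0 then some s
      else firstRow i rs (s + 1)

-- inner row loop of B: lookup after the fold
lemma inner_get? (row : List Int) (j : Int) :
    ∀ (s : Int) (t : PySem.Dict Int Int) (i : Int),
    ((PySem.List.enumerate row s).foldl
        (fun t q => if q.2 > 0 ∧ t.contains q.1 = false then t.insert q.1 j else t) t).get? i
      = if t.contains i = false ∧ s ≤ i ∧ i < s + row.length ∧ 0 < row.getD (i - s).toNat 0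
        then some j else t.get? i := by
  induction row with
  | nil => intro s t i; simp [PySem.List.enumerate_nil]
  | cons v vs ih =>
    intro s t i
    rw [PySem.List.enumerate_cons]
    simp only [List.foldl_cons]
    rw [ih]
    by_cases hiv : i = s
    · subst hiv
      by_cases hc : t.contains i = false
      · by_cases hv : 0 < v
        · simp [hv, hc, PySem.Dict.contains_insert_self, PySem.Dict.get?_insert_self]
        · simp [hv, hc]
      · simp at hc
        simp [hc]
    · have hiff : ∀ (P : Prop) (a b : ℤ),
        ((P ∧ s < i ∧ i < s + 1 + (vs.length : ℤ) ∧ 0 < vs[(i - (s + 1)).toNat]?.getD 0)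
          ↔ (P ∧ s ≤ i ∧ i < s + ((vs.length : ℤ) + 1) ∧ 0 < vs[(i - (s + 1)).toNat]?.getD 0)) := by
        intro P a b
        constructor <;> rintro ⟨h1, h2, h3, h4⟩ <;> exact ⟨h1, by omega, by omega, h4⟩
      by_cases hlt : s < i
      · have h1 : (i - s).toNat = (i - (s + 1)).toNat + 1 := by omega
        by_cases hstep : 0 < v ∧ t.contains s = false
        · rw [if_pos hstep]
          rw [PySem.Dict.get?_insert_of_ne _ _ hiv]
          have hcs : (t.insert s j).contains i = t.contains i := by
            rw [PySem.Dict.contains_insert]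
            simp [show (i == s) = false by simp [hiv]]
          rw [hcs]
          simp only [h1, List.getD]
          exact if_congr (hiff _ 0 0) rfl rfl
        · rw [if_neg hstep]
          simp only [h1, List.getD]
          exact if_congr (hiff _ 0 0) rfl rfl
      · have hi : i < s := by omega
        have h2 : ¬ (s + 1 ≤ i) := by omega
        have h3 : ¬ (s ≤ i) := by omega
        by_cases hstep : 0 < v ∧ t.contains s = false
        · rw [if_pos hstep]
          rw [PySem.Dict.get?_insert_of_ne _ _ hiv]
          have hcs : (t.insert s j).contains i = t.contains i := by
            rw [PySem.Dict.contains_insert]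
            simp [show (i == s) = false by simp [hiv]]
          rw [hcs]
          simp [h2, h3]
        · rw [if_neg hstep]
          simp [h2, h3]

-- outer row loop of B: lookup after the fold
lemma outer_get? (i : Int) :
    ∀ (rows : List (List Int)) (s : Int) (t : PySem.Dict Int Int),
    ((PySem.List.enumerate rows s).foldl
        (fun t p =>
          (PySem.List.enumerate p.2).foldl
            (fun t q => if q.2 > 0 ∧ t.contains q.1 = false then t.insert q.1 p.1 else t) t) t).get? i
      = if t.contains i = false then firstRow i rows s else t.get? i := by
  intro rows
  induction rows with
  | nil => intro s t; simp [PySem.List.enumerate_nil, firstRow]; intro h; simp [PySem.Dict.get?_eq_none_iff_contains, h]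
  | cons r rs ih =>
    intro s t
    rw [PySem.List.enumerate_cons]
    simp only [List.foldl_cons]
    rw [ih]
    have hin := inner_get? r s 0 t
    have hcont : ∀ (d : PySem.Dict Int Int), d.contains i = (d.get? i).isSome := fun d =>
      PySem.Dict.contains_eq_isSome_get? d i
    rw [hcont, hin i]
    by_cases hc : t.contains i = false
    · by_cases hhit : 0 ≤ i ∧ i < (r.length : Int) ∧ 0 < r.getD i.toNat 0
      · have hcond : t.contains i = false ∧ 0 ≤ i ∧ i < 0 + r.length ∧ 0 < r.getD (i - 0).toNat 0 := by
          refine ⟨hc, hhit.1, by have := hhit.2.1; omega, by simpa using hhit.2.2⟩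
        rw [if_pos hcond, if_pos hc]
        simp only [firstRow]
        rw [if_pos hhit]
        simp
      · have hcond : ¬ (t.contains i = false ∧ 0 ≤ i ∧ i < 0 + r.length ∧ 0 < r.getD (i - 0).toNat 0) := by
          intro h
          exact hhit ⟨h.2.1, by have := h.2.2.1; omega, by simpa using h.2.2.2⟩
        have ht : t.get? i = none := by
          rw [PySem.Dict.get?_eq_none_iff_contains]; exact hc
        rw [if_neg hcond, ht]
        simp only [Option.isSome_none, firstRow]
        rw [if_pos hc, if_neg hhit]
        simp
    · simp at hc
      have hcond : ¬ (t.contains i = false ∧ 0 ≤ i ∧ i < 0 + r.length ∧ 0 < r.getD (i - 0).toNat 0) := by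
        simp [hc]
      have hsome : (t.get? i).isSome = true := by rw [← hcont]; exact hc
      rw [if_neg hcond]
      simp [hsome, hc]

-- A's inner scan equals firstRow on the dropped suffix
lemma aFind_eq_firstRow (board : List (List Int)) (k : Nat) :
    ∀ (rows : List (List Int)) (s : Nat),
    rows = board.drop s →
    (∀ r ∈ rows, k < r.length) →
    aFind board k (List.range' s rows.length) = (firstRow (k : Int) rows (s : Int)).map Int.toNat := by
  intro rows
  induction rows with
  | nil => intro s _ _; simp [aFind, firstRow]
  | cons r rs ih =>
    intro s hdrop hlen
    have hs : s < board.length := by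
      by_contra h
      have hnil : board.drop s = [] := List.drop_eq_nil_of_le (by omega)
      rw [hnil] at hdrop
      exact List.cons_ne_nil r rs hdrop
    rw [List.drop_eq_getElem_cons hs] at hdrop
    obtain ⟨hr', hrs⟩ := List.cons.inj hdrop
    have hr : board.getD s [] = r := by rw [List.getD_eq_getElem _ _ hs, ← hr']
    have hklen : k < r.length := hlen r (by simp)
    simp only [List.length_cons]
    rw [List.range'_succ]
    simp only [aFind, hr]
    by_cases hv : r.getD k 0 > 0
    · have hcond : 0 ≤ (k : Int) ∧ (k : Int) < (r.length : Int) ∧ 0 < r.getD (k : Int).toNat 0 := by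
        refine ⟨Int.natCast_nonneg k, by exact_mod_cast hklen, by simpa using hv⟩
      have hv' : 0 < r[k]?.getD 0 := by simpa [List.getD] using hv
      simp [firstRow, hcond, hv']
    · have hcond : ¬ (0 ≤ (k : Int) ∧ (k : Int) < (r.length : Int) ∧ 0 < r.getD (k : Int).toNat 0) := by
        intro h; exact hv (by simpa using h.2.2)
      simp only [hv, if_neg hcond, firstRow, if_false]
      have := ih (s + 1) hrs (fun r hr => hlen r (by simp [hr]))
      exact_mod_cast this

-- firstRow at nonnegative start returns a nonnegative index
lemma firstRow_nonneg (i : Int) :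
    ∀ (rows : List (List Int)) (s : Int), 0 ≤ s →
    ∀ j, firstRow i rows s = some j → 0 ≤ j := by
  intro rows
  induction rows with
  | nil => intro s _ j h; simp [firstRow] at h
  | cons r rs ih =>
    intro s hs j h
    simp only [firstRow] at h
    split at h
    · simp at h; omega
    · exact ih (s + 1) (by omega) j h

-- A as a filterMap over the columns
lemma foldl_opt (f : Nat → Option Nat) (l : List Nat) :
    ∀ acc, l.foldl (fun pos i => match f i with | some j => pos ++ [(j : Int)] | none => pos) acc
      = acc ++ l.filterMap (fun i => (f i).map (fun j => (j : Int))) := by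
  induction l with
  | nil => intro acc; simp
  | cons x xs ih =>
    intro acc
    simp only [List.foldl_cons, List.filterMap_cons]
    cases h : f x with
    | none => simp [ih]
    | some j => simp [ih]

-- ===== VERDICT (by name: the statement is the Claim_ definition above) =====
theorem get_Q_Positions_spec : Claim_equal_get_Q_Positions := by
  intro board _ hpre
  unfold Spec_get_Q_Positions get_Q_Positions get_Q_Positions_alt
  rw [foldl_opt]
  rw [PySem.List.pyRange_zero_nat]
  rw [List.filterMap_map]
  simp only [List.nil_append]
  apply List.filterMap_congr
  intro k hk
  have hk' : k < board.length := List.mem_range.mp hk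
  have hlook := outer_get? (k : Int) board 0 PySem.Dict.empty
  have hB : (bTable board).get? (k : Int) = firstRow (k : Int) board 0 := by
    unfold bTable
    rw [hlook]
    simp [PySem.Dict.contains_empty]
  have hA : aFind board k (List.range' 0 board.length) = (firstRow (k : Int) board 0).map Int.toNat := by
    have := aFind_eq_firstRow board k board 0 (by simp)
      (fun r hr => lt_of_lt_of_le hk' (hpre r hr))
    simpa using this
  rw [show List.range board.length = List.range' 0 board.length from List.range_eq_range', hA]
  simp only [Function.comp]
  rw [hB]
  cases h : firstRow (k : Int) board 0 with
  | none => simp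
  | some j =>
    have hj : 0 ≤ j := firstRow_nonneg (k : Int) board 0 le_rfl j h
    simp [Int.toNat_of_nonneg hj]
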